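-- pv_equiv track=rewrite | github.com/Xza85hrf/AudioSmith | audiosmith/prosody.py | _find_vowel_clusters
-- ===== SOURCE A (Python) =====
-- from typing import List, Tuple
--
-- def _find_vowel_clusters(word: str, vowels: set[str] | frozenset[str]) -> List[Tuple[int, int]]:
--     """Find start/end indices of vowel clusters (syllable nuclei) in a word.
--
--     Args:
--         word: The word to analyze.
--         vowels: Set of characters to treat as vowels (language-specific).
--
--     Returns:
--         List of (start_index, end_index) tuples for each vowel cluster.
--     """
--     clusters: List[Tuple[int, int]] = []
--     i = 0
--     lower = word.lower()
--     while i < len(lower):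
--         if lower[i] in vowels:
--             start = i
--             while i < len(lower) and lower[i] in vowels:
--                 i += 1
--             clusters.append((start, i))
--         else:
--             i += 1
--     return clusters
-- ===== SOURCE B (Python) =====
-- from typing import List, Tuple
--
-- def _find_vowel_clusters(word: str, vowels) -> List[Tuple[int, int]]:
--     """Staged boundary detection: build a vowel mask, pair it with its
--     one-shifted copy, collect rising edges (cluster starts) and falling
--     edges (cluster ends) as separate lists, and zip them together."""
--     lower = word.lower()
--     mask = [c in vowels for c in lower]
--     pairs = list(zip([False] + mask, mask))
--     starts = [i for i, (p, b) in enumerate(pairs) if b and not p]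
--     ends = [i for i, (p, b) in enumerate(pairs) if p and not b]
--     if mask and mask[-1]:
--         ends.append(len(mask))
--     return list(zip(starts, ends))
-- ===== Notes on version B (the rewrite author's own statement) =====
-- stated objective: alternative
-- what changed: Replaces A's nested index while-loops with staged passes: a boolean vowel mask, rising/falling edge detection by comparing the mask with its one-shifted copy, and a zip of the start and end edge lists.
import Mathlib
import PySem

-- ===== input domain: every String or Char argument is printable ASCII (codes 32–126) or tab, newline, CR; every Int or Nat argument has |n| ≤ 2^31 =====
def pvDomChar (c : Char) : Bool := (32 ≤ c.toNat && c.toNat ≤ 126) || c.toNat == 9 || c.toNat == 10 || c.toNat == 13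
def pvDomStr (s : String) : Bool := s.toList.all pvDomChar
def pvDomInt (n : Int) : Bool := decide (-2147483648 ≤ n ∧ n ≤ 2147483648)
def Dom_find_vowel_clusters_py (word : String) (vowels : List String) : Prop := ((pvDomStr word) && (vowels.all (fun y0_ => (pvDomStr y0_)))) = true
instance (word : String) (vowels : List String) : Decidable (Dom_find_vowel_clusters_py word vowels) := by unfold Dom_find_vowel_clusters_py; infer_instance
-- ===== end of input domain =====

-- B replaces A's nested while-loops with staged passes: a vowel mask, edge detection against the shifted mask, and a zip of the start/end edge lists (alternative decomposition, same cost).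


-- ===== PORT A =====
-- Python's `lower[i] in vowels`: the 1-char string at position i tested against the set
def pvIsVowel (vowels : List String) (c : Char) : Bool := vowels.contains (String.ofList [c])

-- inner `while i < len(lower) and lower[i] in vowels: i += 1`, recursion on the suffix at i
def pvAInner (vowels : List String) : List Char → Nat → Nat × List Char
  | [], i => (i, [])
  | c :: cs, i => if pvIsVowel vowels c then pvAInner vowels cs (i + 1) else (i, c :: cs)

theorem pvAInner_len (vowels : List String) : ∀ (cs : List Char) (i : Nat),
    (pvAInner vowels cs i).2.length ≤ cs.length := by
  intro cs
  induction cs with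
  | nil => intro i; simp [pvAInner]
  | cons c cs ih =>
      intro i
      simp only [pvAInner]
      split
      · exact Nat.le_trans (ih (i + 1)) (Nat.le_succ _)
      · exact Nat.le_refl _

-- outer `while i < len(lower)`, recursion on the suffix at i
def pvAOuter (vowels : List String) : List Char → Nat → List (Int × Int)
  | [], _ => []
  | c :: cs, i =>
      if pvIsVowel vowels c then
        let p := pvAInner vowels cs (i + 1)
        ((i : Int), (p.1 : Int)) :: pvAOuter vowels p.2 p.1
      else
        pvAOuter vowels cs (i + 1)
  termination_by cs _ => cs.length
  decreasing_by
    · exact Nat.lt_succ_of_le (pvAInner_len vowels cs (i + 1))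
    · exact Nat.lt_succ_of_le (Nat.le_refl _)

def find_vowel_clusters_py (word : String) (vowels : List String) : List (Int × Int) :=
  pvAOuter vowels (PySem.Str.lower word).toList 0

-- ===== PORT B =====
-- `mask = [c in vowels for c in lower]`, `pairs = zip([False]+mask, mask)`,
-- `starts`/`ends` as enumerate-filter comprehensions, the final `append` guard, and `zip(starts, ends)`
def find_vowel_clusters_py_alt (word : String) (vowels : List String) : List (Int × Int) :=
  let mask := (PySem.Str.lower word).toList.map (pvIsVowel vowels)
  let pairs := (false :: mask).zip mask
  let starts := ((PySem.List.enumerate pairs).filter (fun x => x.2.2 && !x.2.1)).map (·.1)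
  let ends0 := ((PySem.List.enumerate pairs).filter (fun x => x.2.1 && !x.2.2)).map (·.1)
  let ends := if mask.getLast? = some true then ends0 ++ [(mask.length : Int)] else ends0
  starts.zip ends

-- ===== PRECONDITION & SPEC =====
def Spec_find_vowel_clusters_py (word : String) (vowels : List String) (out : List (Int × Int)) : Prop := out = find_vowel_clusters_py_alt word vowels
instance (word : String) (vowels : List String) (out : List (Int × Int)) : Decidable (Spec_find_vowel_clusters_py word vowels out) := by unfold Spec_find_vowel_clusters_py; infer_instance

-- ===== CLAIM (what is proved, stated in full; the proofs are below) =====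
def Claim_equal_find_vowel_clusters_py : Prop := ∀ (word : String) (vowels : List String), Dom_find_vowel_clusters_py word vowels → Spec_find_vowel_clusters_py word vowels (find_vowel_clusters_py word vowels)

-- ===== LEMMAS AND PROOFS =====
-- proof-side recursive form of the rising-edge list (cluster starts), prev flag p
def pvS (vowels : List String) : List Char → Int → Bool → List Int
  | [], _, _ => []
  | c :: cs, i, p =>
      if pvIsVowel vowels c && !p then i :: pvS vowels cs (i + 1) (pvIsVowel vowels c)
      else pvS vowels cs (i + 1) (pvIsVowel vowels c)

-- proof-side recursive form of the falling-edge list (cluster ends), including the end-of-word edge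
def pvE (vowels : List String) : List Char → Int → Bool → List Int
  | [], i, p => if p then [i] else []
  | c :: cs, i, p =>
      if p && !(pvIsVowel vowels c) then i :: pvE vowels cs (i + 1) (pvIsVowel vowels c)
      else pvE vowels cs (i + 1) (pvIsVowel vowels c)

-- the starts comprehension computes pvS
theorem pvS_eq (vowels : List String) : ∀ (cs : List Char) (i : Int) (p : Bool),
    ((PySem.List.enumerate ((p :: cs.map (pvIsVowel vowels)).zip (cs.map (pvIsVowel vowels))) i).filter
        (fun x => x.2.2 && !x.2.1)).map (·.1) = pvS vowels cs i p := by
  intro cs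
  induction cs with
  | nil => intro i p; simp [pvS, PySem.List.enumerate_nil]
  | cons c cs ih =>
      intro i p
      rw [List.map_cons, List.zip_cons_cons, PySem.List.enumerate_cons, List.filter_cons]
      by_cases h : pvIsVowel vowels c && !p
      · simp only [h, if_pos, List.map_cons, ih, pvS]
      · simp only [h, Bool.false_eq_true, if_neg, not_false_iff, ih, pvS]

-- the ends comprehension plus the final-edge append computes pvE
theorem pvE_eq (vowels : List String) : ∀ (cs : List Char) (i : Int) (p : Bool),
    ((PySem.List.enumerate ((p :: cs.map (pvIsVowel vowels)).zip (cs.map (pvIsVowel vowels))) i).filter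
        (fun x => x.2.1 && !x.2.2)).map (·.1) ++
      (if (cs.map (pvIsVowel vowels)).getLast?.getD p then [i + cs.length] else []) = pvE vowels cs i p := by
  intro cs
  induction cs with
  | nil => intro i p; cases p <;> simp [pvE, PySem.List.enumerate_nil]
  | cons c cs ih =>
      intro i p
      rw [List.map_cons, List.zip_cons_cons, PySem.List.enumerate_cons, List.filter_cons]
      have hlast : ((pvIsVowel vowels c :: cs.map (pvIsVowel vowels)).getLast? ).getD p
          = (cs.map (pvIsVowel vowels)).getLast?.getD (pvIsVowel vowels c) := by
        cases hc : (cs.map (pvIsVowel vowels)) with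
        | nil => simp
        | cons b bs =>
            obtain ⟨x, hx⟩ := Option.isSome_iff_exists.mp ((b :: bs).getLast?_isSome.mpr (by simp))
            simp [hx]
      have hlen : i + ((c :: cs).length : Nat) = (i + 1) + (cs.length : Nat) := by
        simp; ring
      by_cases h : p && !(pvIsVowel vowels c)
      · simp only [h, if_pos, List.map_cons, List.cons_append, hlast, hlen, ih, pvE]
      · simp only [h, Bool.false_eq_true, if_neg, not_false_iff, hlast, hlen, ih, pvE]

-- inside a run (prev = true): pvS is unchanged across the run, pvE emits the run's end
theorem pv_run (vowels : List String) : ∀ (cs : List Char) (i : Nat),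
    pvS vowels cs (i : Int) true = pvS vowels (pvAInner vowels cs i).2 ((pvAInner vowels cs i).1 : Int) false ∧
    pvE vowels cs (i : Int) true = ((pvAInner vowels cs i).1 : Int) :: pvE vowels (pvAInner vowels cs i).2 ((pvAInner vowels cs i).1 : Int) false := by
  intro cs
  induction cs with
  | nil => intro i; simp [pvS, pvE, pvAInner]
  | cons c cs ih =>
      intro i
      by_cases h : pvIsVowel vowels c
      · have h1 : ((i : Int) + 1) = ((i + 1 : Nat) : Int) := by push_cast; ring
        have hA : pvAInner vowels (c :: cs) i = pvAInner vowels cs (i + 1) := by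
          simp [pvAInner, h]
        rw [hA]
        constructor
        · rw [pvS]; simp only [h, Bool.not_true, Bool.and_false, Bool.false_eq_true, if_neg,
            not_false_iff, h1]; exact (ih (i + 1)).1
        · rw [pvE]; simp only [h, Bool.not_true, Bool.and_false, Bool.false_eq_true, if_neg,
            not_false_iff, h1]; exact (ih (i + 1)).2
      · have hA : pvAInner vowels (c :: cs) i = (i, c :: cs) := by simp [pvAInner, h]
        rw [hA]
        constructor
        · rw [pvS, pvS]; simp [h]
        · rw [pvE, pvE]; simp [h]

-- main invariant: A's outer loop equals the zip of the edge lists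
theorem pv_main (vowels : List String) : ∀ (cs : List Char) (i : Nat),
    pvAOuter vowels cs i = (pvS vowels cs (i : Int) false).zip (pvE vowels cs (i : Int) false) := by
  intro cs i
  generalize hn : cs.length = n
  induction n using Nat.strong_induction_on generalizing cs i with
  | _ n IH =>
  cases cs with
  | nil => simp [pvAOuter, pvS, pvE]
  | cons c cs =>
      by_cases h : pvIsVowel vowels c
      · have h1 : ((i : Int) + 1) = ((i + 1 : Nat) : Int) := by push_cast; ring
        rw [pvAOuter]
        simp only [h, if_pos]
        rw [pvS, pvE]
        simp only [h, Bool.not_false, Bool.and_true, if_pos, Bool.not_true,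
          Bool.false_and, Bool.false_eq_true, if_neg, not_false_iff, h1,
          (pv_run vowels cs (i + 1)).1, (pv_run vowels cs (i + 1)).2, List.zip_cons_cons]
        subst hn
        rw [IH (pvAInner vowels cs (i + 1)).2.length
              (Nat.lt_succ_of_le (pvAInner_len vowels cs (i + 1)))
              (pvAInner vowels cs (i + 1)).2 (pvAInner vowels cs (i + 1)).1 rfl]
      · have h1 : ((i : Int) + 1) = ((i + 1 : Nat) : Int) := by push_cast; ring
        rw [pvAOuter, pvS, pvE]
        simp only [h, Bool.false_and, Bool.false_eq_true, if_neg, not_false_iff, h1]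
        subst hn
        exact IH cs.length (Nat.lt_succ_self _) cs (i + 1) rfl

-- `if mask and mask[-1]: ends.append(...)` as an append of a conditional singleton
theorem pv_if_append {α : Type} (m : List Bool) (e : List α) (x : α) :
    (if m.getLast? = some true then e ++ [x] else e) = e ++ (if m.getLast?.getD false then [x] else []) := by
  cases h : m.getLast? with
  | none => simp
  | some b => cases b <;> simp

-- ===== VERDICT (by name: the statement is the Claim_ definition above) =====
theorem find_vowel_clusters_py_spec : Claim_equal_find_vowel_clusters_py := by
  intro word vowels _
  unfold Spec_find_vowel_clusters_py find_vowel_clusters_py find_vowel_clusters_py_alt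
  simp only []
  rw [pv_if_append, pvS_eq vowels _ 0 false]
  have h0 : ((PySem.Str.lower word).toList.map (pvIsVowel vowels)).length
      = ((PySem.Str.lower word).toList).length := List.length_map ..
  have he := pvE_eq vowels (PySem.Str.lower word).toList 0 false
  rw [show (0 : Int) + ((PySem.Str.lower word).toList.length : Nat) = (((PySem.Str.lower word).toList.map (pvIsVowel vowels)).length : Nat) by rw [h0]; ring] at he
  rw [he]
  exact pv_main vowels _ 0
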